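-- pv_equiv track=rewrite | github.com/sign-language-translator/sign-language-translator | sign_language_translator/text/tokens.py | _extract_sublists_according_to_mask
-- ===== SOURCE A (Python) =====
-- from typing import Any, Dict, Iterable, List, Set, Tuple
--
-- def _extract_sublists_according_to_mask(tokens: List[Any], mask: List[bool]):
--     sublists = []
--     a_list = []
--     for i in range(len(tokens)):
--         if mask[i]:
--             a_list.append(tokens[i])
--         else:
--             if a_list:
--                 sublists.append(a_list)
--                 a_list = []
--
--     if a_list:
--         sublists.append(a_list)
--
--     return sublists
-- ===== SOURCE B (Python) =====
-- def _extract_sublists_according_to_mask(tokens, mask):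
--     n = len(tokens)
--     starts = [i for i in range(n) if mask[i] and (i == 0 or not mask[i - 1])]
--     ends = [i + 1 for i in range(n) if mask[i] and (i == n - 1 or not mask[i + 1])]
--     return [tokens[s:e] for s, e in zip(starts, ends)]
-- ===== Notes on version B (the rewrite author's own statement) =====
-- stated objective: alternative
-- what changed: Replaces A's single-pass accumulator-and-flush loop with a boundary-detection algorithm: compute the list of run start indices (mask true, previous false or i=0) and run end indices (mask true, next false or i=n-1), then slice tokens[s:e] for each paired boundary.
import Mathlib
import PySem

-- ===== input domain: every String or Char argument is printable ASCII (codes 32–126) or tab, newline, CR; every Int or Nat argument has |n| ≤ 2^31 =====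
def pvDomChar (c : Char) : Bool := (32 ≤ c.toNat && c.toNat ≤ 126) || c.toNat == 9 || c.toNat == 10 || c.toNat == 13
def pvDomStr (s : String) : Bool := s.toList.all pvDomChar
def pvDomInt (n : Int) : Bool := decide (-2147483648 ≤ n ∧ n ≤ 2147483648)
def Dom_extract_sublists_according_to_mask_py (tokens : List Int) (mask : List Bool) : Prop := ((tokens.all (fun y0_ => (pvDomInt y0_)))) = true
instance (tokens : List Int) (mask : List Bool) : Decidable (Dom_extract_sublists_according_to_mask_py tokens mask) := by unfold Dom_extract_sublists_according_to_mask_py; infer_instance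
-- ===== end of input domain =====

-- B replaces A's accumulator-and-flush loop by boundary detection: compute run start indices and
-- run end indices from the mask, then slice tokens at each (start, end) pair; equal on Pre_ (mask long enough).


-- ===== PORT A =====
-- A's loop over range(len(tokens)); mask[i]/tokens[i] are in range on Pre_, so getD defaults are never hit there.
def extract_sublists_according_to_mask_py (tokens : List Int) (mask : List Bool) : List (List Int) :=
  let r := (List.range tokens.length).foldl
    (fun (st : List (List Int) × List Int) i =>
      if mask.getD i false then (st.1, st.2 ++ [tokens.getD i 0])
      else if st.2 ≠ [] then (st.1 ++ [st.2], ([] : List Int))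
      else st)
    ([], [])
  if r.2 ≠ [] then r.1 ++ [r.2] else r.1

-- ===== PORT B =====
-- starts = [i for i in range(n) if mask[i] and (i == 0 or not mask[i-1])]
-- (mask[i-1] is only consulted when i > 0, so Nat subtraction i-1 is exact)
def pvStarts (tokens : List Int) (mask : List Bool) : List Nat :=
  (List.range tokens.length).filter
    (fun i => mask.getD i false && (decide (i = 0) || !(mask.getD (i - 1) false)))

-- ends = [i + 1 for i in range(n) if mask[i] and (i == n - 1 or not mask[i+1])]
def pvEnds (tokens : List Int) (mask : List Bool) : List Nat :=
  ((List.range tokens.length).filter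
    (fun i => mask.getD i false && (decide (i = tokens.length - 1) || !(mask.getD (i + 1) false)))).map
    (fun i => i + 1)

-- [tokens[s:e] for s, e in zip(starts, ends)]; with 0 ≤ s, e the Python slice tokens[s:e]
-- is exactly (tokens.drop s).take (e - s).
def extract_sublists_according_to_mask_py_alt (tokens : List Int) (mask : List Bool) : List (List Int) :=
  ((pvStarts tokens mask).zip (pvEnds tokens mask)).map
    (fun p => (tokens.drop p.1).take (p.2 - p.1))

-- ===== PRECONDITION & SPEC =====
-- Pre_ excludes exactly the inputs where both A and B raise IndexError: mask shorter than tokens.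
def Pre_extract_sublists_according_to_mask_py (tokens : List Int) (mask : List Bool) : Prop :=
  tokens.length ≤ mask.length
instance (tokens : List Int) (mask : List Bool) : Decidable (Pre_extract_sublists_according_to_mask_py tokens mask) := by unfold Pre_extract_sublists_according_to_mask_py; infer_instance

def pvWitness_extract_sublists_according_to_mask_py : List Int × List Bool :=
  ([1, 2, 3, 4], [true, false, true, true])

def Spec_extract_sublists_according_to_mask_py (tokens : List Int) (mask : List Bool) (out : List (List Int)) : Prop := out = extract_sublists_according_to_mask_py_alt tokens mask
instance (tokens : List Int) (mask : List Bool) (out : List (List Int)) : Decidable (Spec_extract_sublists_according_to_mask_py tokens mask out) := by unfold Spec_extract_sublists_according_to_mask_py; infer_instance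

-- ===== CLAIM (what is proved, stated in full; the proofs are below) =====
def Claim_equal_extract_sublists_according_to_mask_py : Prop := ∀ (tokens : List Int) (mask : List Bool), Dom_extract_sublists_according_to_mask_py tokens mask → Pre_extract_sublists_according_to_mask_py tokens mask → Spec_extract_sublists_according_to_mask_py tokens mask (extract_sublists_according_to_mask_py tokens mask)

-- ===== LEMMAS AND PROOFS =====

-- the A-side step on one (token, mask-bit) pair
def pvStep (st : List (List Int) × List Int) (p : Int × Bool) : List (List Int) × List Int :=
  if p.2 then (st.1, st.2 ++ [p.1]) else if st.2 ≠ [] then (st.1 ++ [st.2], []) else st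

-- characterisation of "process the rest with pending run acc"
def pvSpecG : List (Int × Bool) → List Int → List (List Int)
  | [], acc => if acc = [] then [] else [acc]
  | (t, m) :: xs, acc =>
    if m then pvSpecG xs (acc ++ [t])
    else if acc = [] then pvSpecG xs [] else acc :: pvSpecG xs []

-- B-side recursive views of the two boundary lists (p = previous mask bit, k = current index)
def pvBStarts : List (Int × Bool) → Bool → Nat → List Nat
  | [], _, _ => []
  | (_, m) :: rest, p, k =>
    if m && !p then k :: pvBStarts rest m (k + 1) else pvBStarts rest m (k + 1)

def pvBEnds : List (Int × Bool) → Nat → List Nat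
  | [], _ => []
  | (_, m) :: rest, k =>
    if m && (rest.isEmpty || !(rest.headD (0, false)).2) then (k + 1) :: pvBEnds rest (k + 1)
    else pvBEnds rest (k + 1)

-- the flushed foldl of pvStep is subs ++ pvSpecG
theorem pvFoldl_step : ∀ (l : List (Int × Bool)) (subs : List (List Int)) (acc : List Int),
    (let r := l.foldl pvStep (subs, acc); if r.2 ≠ [] then r.1 ++ [r.2] else r.1)
      = subs ++ pvSpecG l acc := by
  intro l
  induction l with
  | nil => intro subs acc; by_cases h : acc = [] <;> simp [pvSpecG, h]
  | cons p xs ih =>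
    intro subs acc
    obtain ⟨t, m⟩ := p
    cases m with
    | true => simpa [pvStep, pvSpecG] using ih subs (acc ++ [t])
    | false =>
      by_cases hacc : acc = [] <;>
        simp [pvStep, pvSpecG, hacc, ih, List.append_assoc]

-- the index loop equals the foldl of pvStep over the zip (lengths permitting)
theorem pvRange'_zip : ∀ (tl : List Int) (ml : List Bool) (toks : List Int) (msk : List Bool)
    (k : Nat) (s : List (List Int) × List Int),
    toks.drop k = tl → msk.drop k = ml → tl.length ≤ ml.length →
    (List.range' k tl.length).foldl
      (fun st i =>
        if msk.getD i false then (st.1, st.2 ++ [toks.getD i 0])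
        else if st.2 ≠ [] then (st.1 ++ [st.2], ([] : List Int))
        else st) s
    = (tl.zip ml).foldl pvStep s := by
  intro tl
  induction tl with
  | nil => intro ml toks msk k s _ _ _; rfl
  | cons t ts ih =>
    intro ml toks msk k s hdt hdm hlen
    match ml, hlen with
    | m :: ms, hl =>
      have htk : toks[k]? = some t := by
        have h3 : (List.drop k toks)[0]? = some t := by rw [hdt]; rfl
        rwa [List.getElem?_drop, Nat.add_zero] at h3
      have hmk : msk[k]? = some m := by
        have h3 : (List.drop k msk)[0]? = some m := by rw [hdm]; rfl
        rwa [List.getElem?_drop, Nat.add_zero] at h3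
      have hdt' : toks.drop (k + 1) = ts := by
        have h3 : (toks.drop k).tail = toks.drop (k + 1) := by
          rw [← List.drop_drop]; simp
        rw [← h3, hdt]; rfl
      have hdm' : msk.drop (k + 1) = ms := by
        have h3 : (msk.drop k).tail = msk.drop (k + 1) := by
          rw [← List.drop_drop]; simp
        rw [← h3, hdm]; rfl
      have hlen' : ts.length ≤ ms.length := by simpa using hl
      simp only [List.length_cons]
      rw [List.range'_succ, List.foldl_cons, List.zip_cons_cons, List.foldl_cons]
      rw [ih ms toks msk (k + 1) _ hdt' hdm' hlen']
      congr 1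
      simp [pvStep, List.getD, htk, hmk]

-- basic facts about the zip suffix
theorem pvZip_head (tokens : List Int) (mask : List Bool) (k : Nat) (t : Int) (m : Bool)
    (rest : List (Int × Bool)) (h : (tokens.zip mask).drop k = (t, m) :: rest) :
    tokens[k]? = some t ∧ mask[k]? = some m ∧ (tokens.zip mask).drop (k + 1) = rest := by
  have h0 : (tokens.zip mask)[k]? = some (t, m) := by
    have := congrArg (fun l => l[0]?) h
    simpa [List.getElem?_drop] using this
  rw [List.getElem?_zip_eq_some] at h0
  refine ⟨h0.1, h0.2, ?_⟩
  have := congrArg List.tail h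
  simpa [List.tail_drop] using this

-- the range-filter form of starts equals the recursive view
theorem pvStarts_rec : ∀ (zs : List (Int × Bool)) (tokens : List Int) (mask : List Bool)
    (k : Nat) (p : Bool),
    (tokens.zip mask).drop k = zs →
    (k = 0 → p = false) → (0 < k → mask.getD (k - 1) false = p) →
    (List.range' k zs.length).filter
      (fun i => mask.getD i false && (decide (i = 0) || !(mask.getD (i - 1) false)))
      = pvBStarts zs p k := by
  intro zs
  induction zs with
  | nil => intro tokens mask k p _ _ _; rfl
  | cons q rest ih =>
    intro tokens mask k p hz h0 h1
    obtain ⟨t, m⟩ := q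
    obtain ⟨htk, hmk, hrest⟩ := pvZip_head tokens mask k t m rest hz
    have hm : mask.getD k false = m := by simp [List.getD, hmk]
    have hrec := ih tokens mask (k + 1) m hrest (by omega) (fun _ => by simpa using hm)
    have hpred : (mask.getD k false && (decide (k = 0) || !(mask.getD (k - 1) false))) = (m && !p) := by
      rcases Nat.eq_zero_or_pos k with hk | hk
      · subst hk; simp [h0 rfl, List.getD, hmk]
      · have hp' := h1 hk
        simp only [List.getD] at hp' hm ⊢
        simp [hm, hp', Nat.pos_iff_ne_zero.mp hk]
    simp only [List.length_cons, List.range'_succ, List.filter_cons, hpred, pvBStarts, hrec]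

-- the range-filter-map form of ends equals the recursive view (needs mask covering tokens)
theorem pvEnds_rec : ∀ (zs : List (Int × Bool)) (tokens : List Int) (mask : List Bool) (k : Nat),
    (tokens.zip mask).drop k = zs → tokens.length ≤ mask.length →
    ((List.range' k zs.length).filter
      (fun i => mask.getD i false && (decide (i = tokens.length - 1) || !(mask.getD (i + 1) false)))).map
      (fun i => i + 1)
      = pvBEnds zs k := by
  intro zs
  induction zs with
  | nil => intro tokens mask k _ _; rfl
  | cons q rest ih =>
    intro tokens mask k hz hlen
    obtain ⟨t, m⟩ := q
    obtain ⟨htk, hmk, hrest⟩ := pvZip_head tokens mask k t m rest hz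
    have hm : mask.getD k false = m := by simp [List.getD, hmk]
    have hziplen : (tokens.zip mask).length = tokens.length := by
      simp [List.length_zip]; omega
    have hk : k < tokens.length := by
      have := congrArg List.length hz
      simp [hziplen] at this; omega
    have hrl : rest.length = tokens.length - (k + 1) := by
      have := congrArg List.length hz
      simp [hziplen] at this; omega
    have hrec := ih tokens mask (k + 1) hrest hlen
    have hpred : (mask.getD k false && (decide (k = tokens.length - 1) || !(mask.getD (k + 1) false)))
        = (m && (rest.isEmpty || !(rest.headD (0, false)).2)) := by
      rcases hr : rest with _ | ⟨⟨t', m'⟩, rest'⟩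
      · have hke : k = tokens.length - 1 := by subst hr; simp at hrl; omega
        simp [List.getD, hmk, ← hke]
      · obtain ⟨_, hmk', _⟩ := pvZip_head tokens mask (k + 1) t' m' rest' (by rw [hrest, hr])
        have hne : ¬ (k = tokens.length - 1) := by subst hr; simp at hrl; omega
        simp [List.getD, hmk, hne, hmk']
    have hbe : pvBEnds ((t, m) :: rest) k
        = if (m && (rest.isEmpty || !(rest.headD (0, false)).2)) then (k + 1) :: pvBEnds rest (k + 1)
          else pvBEnds rest (k + 1) := rfl
    simp only [List.length_cons, List.range'_succ, List.filter_cons, hpred, hbe]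
    cases hb : (m && (rest.isEmpty || !(rest.headD (0, false)).2))
    · rw [if_neg (by simp), if_neg (by simp)]
      exact hrec
    · rw [if_pos (by simp), if_pos (by simp), List.map_cons, hrec]

theorem pvSpecG_flush (zs : List (Int × Bool)) (a : List Int)
    (h : zs = [] ∨ (zs.headD (0, false)).2 = false) (ha : a ≠ []) :
    pvSpecG zs a = a :: pvSpecG zs [] := by
  rcases zs with _ | ⟨⟨t, m⟩, rest⟩
  · simp [pvSpecG, ha]
  · simp only [List.headD_cons] at h
    rcases h with h | h
    · exact absurd h (by simp)
    · subst h; simp [pvSpecG, ha]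

-- pairing starts with ends and slicing yields pvSpecG
theorem pvMainZip : ∀ (zs : List (Int × Bool)) (tokens : List Int) (mask : List Bool)
    (k : Nat) (o : Option Nat) (p : Bool),
    (tokens.zip mask).drop k = zs →
    (match o with
     | some s => s < k ∧ p = true ∧ (zs.headD (0, false)).2 = true
     | none => p = true → (zs.headD (0, false)).2 = false) →
    ((o.elim (pvBStarts zs p k) (fun s => s :: pvBStarts zs p k)).zip (pvBEnds zs k)).map
      (fun q => (tokens.drop q.1).take (q.2 - q.1))
      = pvSpecG zs (o.elim [] (fun s => (tokens.drop s).take (k - s))) := by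
  intro zs
  induction zs with
  | nil =>
    intro tokens mask k o p _ ho
    rcases o with _ | s
    · rfl
    · simp at ho
  | cons q rest ih =>
    intro tokens mask k o p hz ho
    obtain ⟨t, m⟩ := q
    obtain ⟨htk, hmk, hrest⟩ := pvZip_head tokens mask k t m rest hz
    have hkn : k < tokens.length := by
      cases hlt : tokens[k]? with
      | none => rw [hlt] at htk; cases htk
      | some _ => exact (List.getElem?_eq_some_iff.mp htk).1
    have hsl1 : (tokens.drop k).take 1 = [t] := by
      rw [show (1 : Nat) = 0 + 1 from rfl, List.take_add_one]
      simp [List.getElem?_drop, htk]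
    have hbsc : ∀ p' k', pvBStarts ((t, m) :: rest) p' k'
        = if m && !p' then k' :: pvBStarts rest m (k' + 1) else pvBStarts rest m (k' + 1) := by
      intro p' k'; rfl
    have hbec : ∀ k', pvBEnds ((t, m) :: rest) k'
        = if m && (rest.isEmpty || !(rest.headD (0, false)).2) then (k' + 1) :: pvBEnds rest (k' + 1)
          else pvBEnds rest (k' + 1) := by
      intro k'; rfl
    rcases o with _ | s
    · -- no open run
      simp only [Option.elim] at ho ⊢
      cases m with
      | false =>
        have hrec := ih tokens mask (k + 1) none false hrest (by simp)
        simp only [Option.elim] at hrec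
        simp only [hbsc, hbec, Bool.false_and, if_neg (by simp : ¬ (false = true))]
        simpa [pvSpecG] using hrec
      | true =>
        have hp : p = false := by
          cases p
          · rfl
          · exact absurd (ho rfl) (by simp)
        subst hp
        cases hc : (rest.isEmpty || !(rest.headD (0, false)).2) with
        | true =>
          have hhd : (rest.headD (0, false)).2 = false := by
            cases hcc : rest.isEmpty with
            | true => rw [List.isEmpty_iff.mp hcc]; rfl
            | false => rw [hcc] at hc; simpa using hc
          have hrec := ih tokens mask (k + 1) none true hrest (fun _ => hhd)
          simp only [Option.elim] at hrec
          simp only [hbsc, hbec, hc, Bool.and_true, Bool.not_false]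
          have hfl := pvSpecG_flush rest [t] (Or.inr hhd) (by simp)
          simp [pvSpecG, hsl1, hfl, hrec]
        | false =>
          obtain ⟨hc1, hc2⟩ : rest.isEmpty = false ∧ (rest.headD (0, false)).2 = true := by
            simpa using hc
          have hrec := ih tokens mask (k + 1) (some k) true hrest ⟨by omega, rfl, hc2⟩
          simp only [Option.elim] at hrec
          simp only [hbsc, hbec, hc, Bool.and_true, Bool.true_and, Bool.not_false,
            if_neg (by simp : ¬ (false = true))]
          simp [pvSpecG, hsl1, hrec]
    · -- open run started at s
      obtain ⟨hsk, hp, hhd0⟩ := ho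
      have hm : m = true := by simpa using hhd0
      subst hm hp
      have hext : (tokens.drop s).take (k + 1 - s) = (tokens.drop s).take (k - s) ++ [t] := by
        have h1 : k + 1 - s = (k - s) + 1 := by omega
        rw [h1, List.take_add_one, List.getElem?_drop, show s + (k - s) = k by omega, htk]
        rfl
      have hne : (tokens.drop s).take (k + 1 - s) ≠ [] := by
        have hl : ((tokens.drop s).take (k + 1 - s)).length = min (k + 1 - s) (tokens.length - s) := by
          simp
        intro hnil
        rw [hnil] at hl
        simp at hl
        omega
      cases hc : (rest.isEmpty || !(rest.headD (0, false)).2) with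
      | true =>
        have hhd : (rest.headD (0, false)).2 = false := by
          cases hcc : rest.isEmpty with
          | true => rw [List.isEmpty_iff.mp hcc]; rfl
          | false => rw [hcc] at hc; simpa using hc
        have hrec := ih tokens mask (k + 1) none true hrest (fun _ => hhd)
        simp only [Option.elim] at hrec
        simp only [Option.elim, hbsc, hbec, hc, Bool.and_true, Bool.not_true, Bool.and_false,
          if_neg (by simp : ¬ (false = true))]
        have hfl := pvSpecG_flush rest ((tokens.drop s).take (k + 1 - s)) (Or.inr hhd) hne
        rw [hext] at hfl
        simp [pvSpecG, hfl, hext, hrec]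
      | false =>
        obtain ⟨hc1, hc2⟩ : rest.isEmpty = false ∧ (rest.headD (0, false)).2 = true := by
          simpa using hc
        have hrec := ih tokens mask (k + 1) (some s) true hrest ⟨by omega, rfl, hc2⟩
        simp only [Option.elim] at hrec
        simp only [Option.elim, hbsc, hbec, hc, Bool.not_true, Bool.and_false,
          if_neg (by simp : ¬ (false = true)), hrec]
        simp [pvSpecG, hext]

theorem pv_main : ∀ (tokens : List Int) (mask : List Bool),
    tokens.length ≤ mask.length →
    extract_sublists_according_to_mask_py tokens mask
      = extract_sublists_according_to_mask_py_alt tokens mask := by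
  intro tokens mask hlen
  have hzl : (tokens.zip mask).length = tokens.length := by
    simp [List.length_zip]; omega
  unfold extract_sublists_according_to_mask_py extract_sublists_according_to_mask_py_alt pvStarts pvEnds
  simp only [List.range_eq_range']
  rw [pvRange'_zip tokens mask tokens mask 0 ([], []) (by simp) (by simp) hlen]
  have hA := pvFoldl_step (tokens.zip mask) [] []
  simp only [List.nil_append] at hA
  rw [hA]
  have hS := pvStarts_rec (tokens.zip mask) tokens mask 0 false (by simp) (fun _ => rfl) (by omega)
  have hE := pvEnds_rec (tokens.zip mask) tokens mask 0 (by simp) hlen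
  rw [hzl] at hS hE
  rw [hS, hE]
  have hM := pvMainZip (tokens.zip mask) tokens mask 0 none false (by simp) (by simp)
  simp only [Option.elim] at hM
  exact hM.symm

-- ===== VERDICT (by name: the statement is the Claim_ definition above) =====
theorem extract_sublists_according_to_mask_py_spec : Claim_equal_extract_sublists_according_to_mask_py := by
  intro tokens mask _ hpre
  exact pv_main tokens mask hpre
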